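-- pv_equiv track=rewrite | github.com/pypi-data/pypi-mirror-403 | packages/rda-python-common/rda_python_common-2.0.16.tar.gz/rda_python_common-2.0.16/src/rda_python_common/pg_util.py | addrecord
-- ===== SOURCE A (Python) =====
-- def addrecord(records, record, idx):
--    if records is None: records = {}   # initialize dist of lists structure
--    if not records:
--       for key in record:
--          records[key] = []
--    for key in record:
--       slen = len(records[key])
--       if idx < slen:
--          records[key][idx] = record[key]
--       else:
--          while idx > slen:
--             records[key].append(None)
--             slen += 1
--          records[key].append(record[key])
--    return records
-- ===== SOURCE B (Python) =====
-- def _grown(lst, idx, val):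
--     """Copy of lst grown so that index idx exists, with lst[idx] = val."""
--     n = len(lst)
--     if idx >= n:
--         return lst[:] + [None] * (idx - n) + [val]
--     out = lst[:]
--     out[idx] = val
--     return out
--
--
-- def addrecord(records, record, idx):
--     # Pure rebuild (A mutates `records` in place; equivalence is about the
--     # return value): one uniform grow-then-assign per key instead of A's
--     # two-branch assign / while-pad-append mutation.
--     if not records:
--         return {k: _grown([], idx, v) for k, v in record.items()}
--     return {k: (_grown(lst, idx, record[k]) if k in record else lst)
--             for k, lst in records.items()}
-- ===== Notes on version B (the rewrite author's own statement) =====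
-- stated objective: simpler
-- what changed: B is a pure rebuild: instead of A's in-place per-key mutation with two branches (in-range assignment vs a while loop appending Nones then the value), B maps once over the dict and applies a single uniform grow-then-assign (slice-copy, extend with [None]*(idx-n), set) per key; return value is identical, but B does not mutate the records argument.
import Mathlib
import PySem

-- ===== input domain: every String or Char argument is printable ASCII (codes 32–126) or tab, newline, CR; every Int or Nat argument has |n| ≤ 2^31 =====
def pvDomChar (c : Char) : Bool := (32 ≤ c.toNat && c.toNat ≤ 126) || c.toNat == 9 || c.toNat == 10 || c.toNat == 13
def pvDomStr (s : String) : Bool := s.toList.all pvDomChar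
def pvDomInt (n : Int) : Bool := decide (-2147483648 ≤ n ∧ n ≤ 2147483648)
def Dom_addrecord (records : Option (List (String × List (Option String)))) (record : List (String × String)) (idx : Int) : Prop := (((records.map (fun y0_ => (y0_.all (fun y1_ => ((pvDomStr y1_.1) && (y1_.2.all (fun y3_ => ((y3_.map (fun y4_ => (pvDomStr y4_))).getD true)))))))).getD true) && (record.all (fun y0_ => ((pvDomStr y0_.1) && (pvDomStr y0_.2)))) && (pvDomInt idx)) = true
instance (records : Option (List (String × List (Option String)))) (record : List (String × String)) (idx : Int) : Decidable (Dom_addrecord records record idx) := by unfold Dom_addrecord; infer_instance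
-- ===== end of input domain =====

-- B rebuilds the result with one uniform grow-then-assign per key instead of A's
-- two-branch mutation (in-range assignment vs while-pad-then-append); equivalence is
-- about the RETURN value only (Python A mutates `records` in place, B is pure).

-- ===== PORT A =====
-- the `while idx > slen: records[key].append(None); slen += 1` loop of A
def padA (idx : Int) (lst : List (Option String)) (slen : Int) : List (Option String) :=
  if idx > slen then padA idx (lst ++ [none]) (slen + 1) else lst
termination_by (idx - slen).toNat
decreasing_by omega

def addrecord (records : Option (List (String × List (Option String)))) (record : List (String × String)) (idx : Int) : List (String × List (Option String)) :=
  let rd : PySem.Dict String String := PySem.Dict.ofList record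
  let rl := (records.getD [])          -- `if records is None: records = {}`
  let rs0 : PySem.Dict String (List (Option String)) := PySem.Dict.ofList rl
  -- `if not records:` — the dict built from rl is empty iff rl is
  let rs1 := if rl.isEmpty then rd.keys.foldl (fun d k => d.insert k []) rs0 else rs0
  (rd.keys.foldl (fun d k =>
      let lst := d.getD k []
      let slen : Int := lst.length
      if idx < slen then
        d.insert k (PySem.List.pySetD lst idx (some (rd.getD k "")))
      else
        d.insert k (padA idx lst slen ++ [some (rd.getD k "")])) rs1).items

-- ===== PORT B =====
def grown (lst : List (Option String)) (idx : Int) (v : String) : List (Option String) :=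
  if (lst.length : Int) ≤ idx then
    lst ++ List.replicate (idx - lst.length).toNat none ++ [some v]
  else
    PySem.List.pySetD lst idx (some v)

def addrecord_alt (records : Option (List (String × List (Option String)))) (record : List (String × String)) (idx : Int) : List (String × List (Option String)) :=
  let rd : PySem.Dict String String := PySem.Dict.ofList record
  let rl := (records.getD [])
  if rl.isEmpty then
    rd.items.map (fun p => (p.1, grown [] idx p.2))
  else
    let rs : PySem.Dict String (List (Option String)) := PySem.Dict.ofList rl
    rs.items.map (fun p =>
      if rd.contains p.1 then (p.1, grown p.2 idx (rd.getD p.1 "")) else (p.1, p.2))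

-- ===== PRECONDITION & SPEC =====
-- Pre_ExactlyWhereAReturns: A raises KeyError when `records` is non-empty and some key of
-- `record` is absent from it, and IndexError when idx is negative and below -len for some
-- target list (or `records` empty/None with record non-empty and idx < 0); Pre_ excludes
-- exactly those raising inputs and nothing else.
def Pre_addrecord (records : Option (List (String × List (Option String)))) (record : List (String × String)) (idx : Int) : Prop :=
  let rl := (records.getD [])
  if rl.isEmpty then
    (record.isEmpty || decide (0 ≤ idx)) = true
  else
    record.all (fun p =>
      match (PySem.Dict.ofList rl : PySem.Dict String (List (Option String))).get? p.1 with
      | some lst => decide (0 ≤ idx) || decide (-(lst.length : Int) ≤ idx)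
      | none => false) = true
instance (records : Option (List (String × List (Option String)))) (record : List (String × String)) (idx : Int) : Decidable (Pre_addrecord records record idx) := by unfold Pre_addrecord; infer_instance

def pvWitness_addrecord : (Option (List (String × List (Option String)))) × (List (String × String)) × Int :=
  (some [("a", [some "x", none])], [("a", "y")], 0)

def Spec_addrecord (records : Option (List (String × List (Option String)))) (record : List (String × String)) (idx : Int) (out : List (String × List (Option String))) : Prop := out = addrecord_alt records record idx
instance (records : Option (List (String × List (Option String)))) (record : List (String × String)) (idx : Int) (out : List (String × List (Option String))) : Decidable (Spec_addrecord records record idx out) := by unfold Spec_addrecord; infer_instance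

-- ===== CLAIM (what is proved, stated in full; the proofs are below) =====
def Claim_equal_addrecord : Prop := ∀ (records : Option (List (String × List (Option String)))) (record : List (String × String)) (idx : Int), Dom_addrecord records record idx → Pre_addrecord records record idx → Spec_addrecord records record idx (addrecord records record idx)


-- ===== LEMMAS AND PROOFS =====

theorem padA_eq (idx : Int) : ∀ (n : Nat) (lst : List (Option String)) (slen : Int), (idx - slen).toNat = n → padA idx lst slen = lst ++ List.replicate n none := by
  intro n
  induction n with
  | zero => intro lst slen h; rw [padA]; rw [if_neg (by omega)]; simp
  | succ m ih =>
    intro lst slen h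
    rw [padA, if_pos (by omega), ih _ _ (by omega)]
    simp [List.replicate_succ]

theorem grown_eq (idx : Int) (lst : List (Option String)) (v : String) :
    (if idx < (lst.length : Int) then PySem.List.pySetD lst idx (some v)
     else padA idx lst lst.length ++ [some v]) = grown lst idx v := by
  unfold grown
  by_cases h : idx < (lst.length : Int)
  · rw [if_pos h, if_neg (by omega)]
  · rw [if_neg h, if_pos (by omega), padA_eq idx (idx - lst.length).toNat lst lst.length rfl]

theorem fold_insert_items (f : String → List (Option String) → List (Option String)) :
    ∀ (keys : List String) (d : PySem.Dict String (List (Option String))),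
      keys.Nodup → (∀ k ∈ keys, d.contains k = true) →
      (keys.foldl (fun d k => d.insert k (f k (d.getD k []))) d).items
        = d.items.map (fun p => if p.1 ∈ keys then (p.1, f p.1 (d.getD p.1 [])) else p) := by
  intro keys
  induction keys with
  | nil => intro d _ _; simp
  | cons k ks ih =>
    intro d hnd hsub
    have hck : d.contains k = true := hsub k (List.mem_cons_self)
    simp only [List.foldl_cons]
    rw [ih (d.insert k (f k (d.getD k []))) (List.nodup_cons.mp hnd).2
        (by intro k' hk'; rw [PySem.Dict.contains_insert]
            simp [hsub k' (List.mem_cons_of_mem _ hk')])]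
    rw [PySem.Dict.items_insert_of_contains _ _ hck, List.map_map]
    apply List.map_congr_left
    intro p _
    simp only [Function.comp]
    by_cases hp : p.1 = k
    · have hkks : k ∉ ks := (List.nodup_cons.mp hnd).1
      simp [hp, hkks]
    · have : (p.1 == k) = false := by simp [hp]
      simp only [this, if_false, Bool.false_eq_true]
      rw [PySem.Dict.getD_insert_of_ne _ _ _ hp]
      by_cases hm : p.1 ∈ ks <;> simp [hm, hp]

theorem keys_ofList_fst {ν : Type} (l : List (String × ν)) :
    (PySem.Dict.ofList l).keys = PySem.Set.ofList (l.map Prod.fst) := by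
  rw [show PySem.Dict.ofList l = l.foldl (fun d p => d.insert p.1 p.2) PySem.Dict.empty from rfl]
  rw [PySem.Dict.keys_foldl_insert_key l Prod.fst (fun _ p => p.2) PySem.Dict.empty]
  simp [PySem.Dict.keys_empty, PySem.Set.update_nil_left]

-- the per-key body of A's main loop is one grow-then-assign
theorem stepA_eq (idx : Int) (rd : PySem.Dict String String) :
    (fun (d : PySem.Dict String (List (Option String))) k =>
      let lst := d.getD k []
      let slen : Int := lst.length
      if idx < slen then
        d.insert k (PySem.List.pySetD lst idx (some (rd.getD k "")))
      else
        d.insert k (padA idx lst slen ++ [some (rd.getD k "")]))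
    = (fun d k => d.insert k (grown (d.getD k []) idx (rd.getD k ""))) := by
  funext d k
  show (if idx < ((d.getD k []).length : Int) then _ else _) = _
  rw [show ∀ (c : Prop) [Decidable c] (x y : List (Option String)),
        (if c then d.insert k x else d.insert k y) = d.insert k (if c then x else y) from
        fun c _ x y => by split <;> rfl]
  rw [grown_eq]

-- ===== VERDICT (by name: the statement is the Claim_ definition above) =====
theorem addrecord_spec : Claim_equal_addrecord := by
  intro records record idx _ hpre
  unfold Spec_addrecord addrecord addrecord_alt
  dsimp only
  simp only [Pre_addrecord] at hpre
  set rd : PySem.Dict String String := PySem.Dict.ofList record with hrd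
  set rl := records.getD [] with hrl
  have hndrd : rd.keys.Nodup := PySem.Dict.nodup_keys_ofList record
  rw [stepA_eq idx rd]
  by_cases he : rl.isEmpty
  · -- records empty / None: initialization loop runs
    have hrle : rl = [] := List.isEmpty_iff.mp he
    rw [if_pos he, if_pos he, hrle]
    rw [show (PySem.Dict.ofList ([] : List (String × List (Option String)))) = PySem.Dict.empty from rfl]
    set rs1 := rd.keys.foldl (fun d k => d.insert k ([] : List (Option String))) PySem.Dict.empty with hrs1
    have hitems : rs1.items = rd.keys.map (fun a => (a, ([] : List (Option String)))) := by
      rw [hrs1, PySem.Dict.items_foldl_insert_fresh rd.keys (fun a => a) (fun _ => [])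
            PySem.Dict.empty (fun a _ => PySem.Dict.contains_empty a) (by simpa using hndrd)]
      rw [show (PySem.Dict.empty : PySem.Dict String (List (Option String))).items = [] from rfl]
      simp
    have hkeys : rs1.keys = rd.keys := by
      show rs1.items.map Prod.fst = rd.keys
      rw [hitems, List.map_map]; exact List.map_id _
    have hsub : ∀ k ∈ rd.keys, rs1.contains k = true := by
      intro k hk
      rw [PySem.Dict.contains_iff_mem_keys, hkeys]; exact hk
    rw [fold_insert_items (fun k lst => grown lst idx (rd.getD k "")) rd.keys rs1 hndrd hsub, hitems, List.map_map]
    rw [PySem.Dict.items_eq_map_keys rd hndrd "", List.map_map]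
    apply List.map_congr_left
    intro a ha
    have hget : rs1.getD a [] = [] :=
      PySem.Dict.getD_of_mem_items rs1 (by rw [hitems]; exact List.mem_map_of_mem ha)
        (by rw [hkeys]; exact hndrd) []
    simp [ha, hget]
  · -- records non-empty: every record key is present (Pre_) and updated in place
    rw [if_neg he, if_neg he]
    rw [if_neg he] at hpre
    set rs : PySem.Dict String (List (Option String)) := PySem.Dict.ofList rl with hrs
    have hndrs : rs.keys.Nodup := PySem.Dict.nodup_keys_ofList rl
    have hsub : ∀ k ∈ rd.keys, rs.contains k = true := by
      intro k hk
      rw [keys_ofList_fst] at hk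
      obtain ⟨p, hp, hpk⟩ := List.mem_map.mp ((PySem.Set.mem_ofList _ _).mp hk)
      have := List.all_eq_true.mp hpre p hp
      rw [PySem.Dict.contains_eq_isSome_get?, ← hpk]
      cases hg : rs.get? p.1 with
      | none => rw [hg] at this; simp at this
      | some lst => simp
    rw [fold_insert_items (fun k lst => grown lst idx (rd.getD k "")) rd.keys rs hndrd hsub]
    apply List.map_congr_left
    intro p hp
    by_cases hm : p.1 ∈ rd.keys
    · have hc : rd.contains p.1 = true := (PySem.Dict.contains_iff_mem_keys rd p.1).mpr hm
      have hget : rs.getD p.1 [] = p.2 :=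
        PySem.Dict.getD_of_mem_items rs (by simpa using hp) hndrs []
      simp [hm, hc, hget]
    · have hc : rd.contains p.1 = false := by
        by_contra h
        exact hm ((PySem.Dict.contains_iff_mem_keys rd p.1).mp (by simpa using h))
      simp [hm, hc]
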